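-- pv_equiv track=rewrite | github.com/HOUNSOU96/CODE-backend | main.py | est_serie_valide
-- ===== SOURCE A (Python) =====
-- from typing import Dict, List, Optional, Set
--
-- series = {lettre: [lettre] + [f"{lettre}{i}" for i in range(1, 10)] for lettre in "ABCDEFG"}
--
-- classes_sans_serie = {"6e", "5e", "4e", "3e"}
--
-- def est_serie_valide(niveau: str, serie: Optional[str]) -> bool:
--     niveau = niveau.lower()
--     if niveau in classes_sans_serie:
--         return serie is None
--     if not serie:
--         return False
--     serie = serie.upper()
--     return any(serie in sous_series for sous_series in series.values())
-- ===== SOURCE B (Python) =====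
-- from typing import Optional
--
-- classes_sans_serie = {"6e", "5e", "4e", "3e"}
--
-- def est_serie_valide(niveau: str, serie: Optional[str]) -> bool:
--     niveau = niveau.lower()
--     if niveau in classes_sans_serie:
--         return serie is None
--     if not serie:
--         return False
--     cs = list(serie.upper())
--     if len(cs) == 1:
--         return cs[0] in "ABCDEFG"
--     if len(cs) == 2:
--         return cs[0] in "ABCDEFG" and cs[1] in "123456789"
--     return False
-- ===== Notes on version B (the rewrite author's own statement) =====
-- stated objective: idiomatic
-- what changed: B drops the generated 70-entry series table and the any-scan over its value lists, and instead validates serie's structure directly: one or two characters, first in A-G, optional second in 1-9.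
import Mathlib
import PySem

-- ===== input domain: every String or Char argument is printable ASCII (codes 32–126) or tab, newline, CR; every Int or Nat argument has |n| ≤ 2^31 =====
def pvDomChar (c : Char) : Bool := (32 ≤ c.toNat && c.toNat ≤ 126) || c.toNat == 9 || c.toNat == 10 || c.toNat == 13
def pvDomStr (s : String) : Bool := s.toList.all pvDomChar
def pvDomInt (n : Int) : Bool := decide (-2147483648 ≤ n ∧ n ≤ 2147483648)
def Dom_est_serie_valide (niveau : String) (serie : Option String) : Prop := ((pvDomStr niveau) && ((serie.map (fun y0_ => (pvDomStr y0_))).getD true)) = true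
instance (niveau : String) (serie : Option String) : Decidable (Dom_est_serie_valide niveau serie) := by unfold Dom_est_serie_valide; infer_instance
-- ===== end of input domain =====

-- B replaces A's scan over the generated series table by a direct character-wise
-- parse of the serie string (idiomatic/simpler; same prelude, same results).

-- ===== PORT A =====
-- module constant: series = {lettre: [lettre] + [f"{lettre}{i}" for i in range(1,10)] for lettre in "ABCDEFG"}
def series : PySem.Dict String (List String) :=
  "ABCDEFG".toList.foldl
    (fun d lettre =>
      d.insert (String.ofList [lettre])
        ([String.ofList [lettre]] ++ (PySem.List.pyRange 1 10 1).map
          (fun i => String.ofList (lettre :: (PySem.Int.toStr i).toList))))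
    PySem.Dict.empty

-- module constant: classes_sans_serie = {"6e", "5e", "4e", "3e"}
def classes_sans_serie : PySem.Set String := PySem.Set.ofList ["6e", "5e", "4e", "3e"]

def est_serie_valide (niveau : String) (serie : Option String) : Bool :=
  let niveau := PySem.Str.lower niveau
  if PySem.Set.contains classes_sans_serie niveau then
    serie.isNone
  else
    match serie with          -- 'if not serie: return False' (None or empty string)
    | none => false
    | some s =>
      if s == "" then false
      else
        let s := PySem.Str.upper s
        (PySem.Dict.values series).any (fun sous_series => sous_series.contains s)

-- ===== PORT B =====
def lettres : List Char := "ABCDEFG".toList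
def chiffres : List Char := "123456789".toList

def est_serie_valide_alt (niveau : String) (serie : Option String) : Bool :=
  if PySem.Set.contains classes_sans_serie (PySem.Str.lower niveau) then
    serie.isNone
  else
    match serie with
    | none => false
    | some s =>
      if s == "" then false
      else
        match (PySem.Str.upper s).toList with   -- cs = list(serie.upper()); len checks + cs[0]/cs[1]
        | [c] => lettres.contains c
        | [c, d] => lettres.contains c && chiffres.contains d
        | _ => false

-- ===== PRECONDITION & SPEC =====
def Spec_est_serie_valide (niveau : String) (serie : Option String) (out : Bool) : Prop := out = est_serie_valide_alt niveau serie
instance (niveau : String) (serie : Option String) (out : Bool) : Decidable (Spec_est_serie_valide niveau serie out) := by unfold Spec_est_serie_valide; infer_instance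

-- ===== CLAIM (what is proved, stated in full; the proofs are below) =====
def Claim_equal_est_serie_valide : Prop := ∀ (niveau : String) (serie : Option String), Dom_est_serie_valide niveau serie → Spec_est_serie_valide niveau serie (est_serie_valide niveau serie)

-- ===== LEMMAS AND PROOFS =====
-- A string is in one of the generated sub-series lists iff it is a letter A..G
-- optionally followed by a digit 1..9.
lemma table_mem_iff_parse (u : String) :
    ((PySem.Dict.values series).any (fun sous_series => sous_series.contains u)) =
    (match u.toList with
     | [c] => lettres.contains c
     | [c, d] => lettres.contains c && chiffres.contains d
     | _ => false) := by
  have hv : PySem.Dict.values series =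
      lettres.map (fun a => String.ofList [a] :: chiffres.map (fun b => String.ofList [a, b])) := by
    decide
  rw [hv, Bool.eq_iff_iff]
  rcases hl : u.toList with _ | ⟨c, _ | ⟨d, _ | ⟨e, rest⟩⟩⟩ <;>
    simp [String.ext_iff, String.toList_ofList, hl]

-- ===== VERDICT (by name: the statement is the Claim_ definition above) =====
theorem est_serie_valide_spec : Claim_equal_est_serie_valide := by
  intro niveau serie _
  unfold Spec_est_serie_valide
  simp only [est_serie_valide, est_serie_valide_alt]
  split_ifs with h
  · rfl
  · cases serie with
    | none => rfl
    | some s =>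
      simp only
      split_ifs with hs
      · rfl
      · exact table_mem_iff_parse (PySem.Str.upper s)
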